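-- pv_equiv track=rewrite | github.com/thomascp2/SportsPredictor | nba/scripts/generate_predictions_daily_V6.py | match_player_to_pp
-- ===== SOURCE A (Python) =====
-- def match_player_to_pp(player_name: str, pp_player_lines: dict) -> str | None:
--     """
--     Match our player name to PrizePicks player name using fuzzy matching.
--
--     Args:
--         player_name: Our format
--         pp_player_lines: Dict from get_all_pp_player_lines
--
--     Returns:
--         PP player name if found, None otherwise
--     """
--     # Exact match first
--     if player_name in pp_player_lines:
--         return player_name
--
--     # Try lowercase
--     player_lower = player_name.lower()
--     for pp_name in pp_player_lines.keys():
--         if pp_name.lower() == player_lower: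
--             return pp_name
--
--     # Last name match
--     last_name = player_name.split()[-1].lower()
--     first_initial = player_name[0].lower() if player_name else ''
--
--     for pp_name in pp_player_lines.keys():
--         pp_parts = pp_name.split()
--         if len(pp_parts) >= 2:
--             pp_last = pp_parts[-1].lower()
--             pp_first_initial = pp_parts[0][0].lower() if pp_parts[0] else ''
--
--             if pp_last == last_name and pp_first_initial == first_initial:
--                 return pp_name
--
--     return None
-- ===== SOURCE B (Python) =====
-- def match_player_to_pp(player_name: str, pp_player_lines: dict) -> str | None:
--     # Single merged scan: lowercase match returns immediately; the first
--     # last-name+initial match is remembered as a fallback candidate.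
--     if player_name in pp_player_lines:
--         return player_name
--
--     player_lower = player_name.lower()
--     parts = player_name.split()
--     # Compute the last-name target lazily/guarded: no IndexError on blank names.
--     target = (parts[-1].lower(), player_name[0].lower()) if parts else None
--
--     candidate = None
--     for pp_name in pp_player_lines:
--         if pp_name.lower() == player_lower:
--             return pp_name
--         if candidate is None and target is not None:
--             pp_parts = pp_name.split()
--             if (len(pp_parts) >= 2
--                     and pp_parts[-1].lower() == target[0]
--                     and pp_parts[0][0].lower() == target[1]):
--                 candidate = pp_name
--     return candidate
-- ===== Notes on version B (the rewrite author's own statement) =====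
-- stated objective: alternative
-- what changed: Replaced A's two sequential scans over the keys by one merged scan that returns on the first lowercase match and remembers the first last-name+initial match in a candidate variable, with the last-name target computed guardedly so blank names return None instead of raising.
import Mathlib
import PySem

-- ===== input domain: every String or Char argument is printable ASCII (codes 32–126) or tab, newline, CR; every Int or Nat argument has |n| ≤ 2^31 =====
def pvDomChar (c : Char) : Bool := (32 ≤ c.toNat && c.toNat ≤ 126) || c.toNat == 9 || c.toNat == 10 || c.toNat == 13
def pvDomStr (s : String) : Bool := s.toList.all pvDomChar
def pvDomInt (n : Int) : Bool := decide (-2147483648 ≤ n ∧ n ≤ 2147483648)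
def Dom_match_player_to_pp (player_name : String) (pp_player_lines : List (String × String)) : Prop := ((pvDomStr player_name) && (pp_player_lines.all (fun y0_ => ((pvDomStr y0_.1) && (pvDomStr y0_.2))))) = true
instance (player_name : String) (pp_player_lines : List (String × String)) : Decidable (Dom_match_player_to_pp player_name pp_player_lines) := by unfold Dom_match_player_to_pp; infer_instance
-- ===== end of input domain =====

-- B merges A's two sequential key scans into one scan with a fallback candidate,
-- computing the last-name target guardedly so blank names return None instead of raising.


-- ===== PORT A =====
-- A's second loop: first key with ≥ 2 name parts whose last name and first initial match.
-- An empty first initial ('') is represented as 'none : Option Char'.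
def pvA_lastLoop (last : String) (fi : Option Char) : List String → Option String
  | [] => none
  | k :: rest =>
    let parts := PySem.Str.split₀ k
    if 2 ≤ parts.length then
      let ppLast := PySem.Str.lower ((PySem.List.pyGet? parts (-1)).getD "")
      let ppFi := if parts.headD "" ≠ "" then (PySem.Str.pyGet? (parts.headD "") 0).map PySem.Chars.lowerChar else none
      if ppLast == last && ppFi == fi then some k else pvA_lastLoop last fi rest
    else pvA_lastLoop last fi rest

def match_player_to_pp (player_name : String) (pp_player_lines : List (String × String)) : Option String :=
  let keys := PySem.List.dedup (pp_player_lines.map Prod.fst)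
  if keys.contains player_name then some player_name
  else
    let player_lower := PySem.Str.lower player_name
    match keys.find? (fun k => PySem.Str.lower k == player_lower) with
    | some k => some k
    | none =>
      -- player_name.split()[-1] raises IndexError on an empty split; Pre_ excludes that,
      -- here .getD "" stands for the unreached value
      let last_name := PySem.Str.lower ((PySem.List.pyGet? (PySem.Str.split₀ player_name) (-1)).getD "")
      let first_initial := if player_name ≠ "" then (PySem.Str.pyGet? player_name 0).map PySem.Chars.lowerChar else none
      pvA_lastLoop last_name first_initial keys

-- ===== PORT B =====
-- B's single merged loop: return first lowercase match; remember first last-name match.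
def pvB_loop (pl : String) (target : Option (String × Option Char)) (cand : Option String) : List String → Option String
  | [] => cand
  | k :: rest =>
    if PySem.Str.lower k == pl then some k
    else
      match cand, target with
      | none, some (l, f) =>
        let parts := PySem.Str.split₀ k
        if decide (2 ≤ parts.length)
            && (PySem.Str.lower ((PySem.List.pyGet? parts (-1)).getD "") == l)
            && ((PySem.Str.pyGet? (parts.headD "") 0).map PySem.Chars.lowerChar == f)
        then pvB_loop pl target (some k) rest
        else pvB_loop pl target cand rest
      | _, _ => pvB_loop pl target cand rest

def match_player_to_pp_alt (player_name : String) (pp_player_lines : List (String × String)) : Option String :=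
  let keys := PySem.List.dedup (pp_player_lines.map Prod.fst)
  if keys.contains player_name then some player_name
  else
    let player_lower := PySem.Str.lower player_name
    let parts := PySem.Str.split₀ player_name
    let target : Option (String × Option Char) :=
      if parts.isEmpty then none
      else some (PySem.Str.lower ((PySem.List.pyGet? parts (-1)).getD ""),
                 (PySem.Str.pyGet? player_name 0).map PySem.Chars.lowerChar)
    pvB_loop player_lower target none keys

-- ===== PRECONDITION & SPEC =====
-- Pre_ excludes exactly the inputs on which A raises IndexError (player_name.split()[-1]
-- on an empty split): an empty/whitespace-only player_name with no case-insensitive key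
-- match; B returns None on those inputs.
def Pre_match_player_to_pp (player_name : String) (pp_player_lines : List (String × String)) : Prop :=
  PySem.Str.split₀ player_name ≠ [] ∨
    (pp_player_lines.map Prod.fst).any (fun k => PySem.Str.lower k == PySem.Str.lower player_name) = true

instance (player_name : String) (pp_player_lines : List (String × String)) : Decidable (Pre_match_player_to_pp player_name pp_player_lines) := by unfold Pre_match_player_to_pp; infer_instance

def pvWitness_match_player_to_pp : String × (List (String × String)) := ("Ann Lee", [("Al Lee", "5")])

def Spec_match_player_to_pp (player_name : String) (pp_player_lines : List (String × String)) (out : Option String) : Prop := out = match_player_to_pp_alt player_name pp_player_lines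
instance (player_name : String) (pp_player_lines : List (String × String)) (out : Option String) : Decidable (Spec_match_player_to_pp player_name pp_player_lines out) := by unfold Spec_match_player_to_pp; infer_instance

-- ===== CLAIM (what is proved, stated in full; the proofs are below) =====
def Claim_equal_match_player_to_pp : Prop := ∀ (player_name : String) (pp_player_lines : List (String × String)), Dom_match_player_to_pp player_name pp_player_lines → Pre_match_player_to_pp player_name pp_player_lines → Spec_match_player_to_pp player_name pp_player_lines (match_player_to_pp player_name pp_player_lines)

-- ===== LEMMAS AND PROOFS =====

-- With no last-name target, B's loop is exactly the first-lowercase-match scan.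
theorem pvB_loop_none (pl : String) (cand : Option String) (keys : List String) :
    pvB_loop pl none cand keys =
      (match keys.find? (fun k => PySem.Str.lower k == pl) with
       | some k => some k
       | none => cand) := by
  induction keys generalizing cand with
  | nil => rfl
  | cons k rest ih =>
    by_cases h : PySem.Str.lower k == pl
    · simp [pvB_loop, List.find?, h]
    · simp [pvB_loop, List.find?, h, ih]

-- With a target, B's merged loop equals A's two sequential scans.
theorem pvB_loop_some (pl l : String) (f : Option Char) (cand : Option String) (keys : List String) :
    pvB_loop pl (some (l, f)) cand keys =
      (match keys.find? (fun k => PySem.Str.lower k == pl) with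
       | some k => some k
       | none =>
         match cand with
         | some c => some c
         | none => pvA_lastLoop l f keys) := by
  induction keys generalizing cand with
  | nil => cases cand <;> rfl
  | cons k rest ih =>
    -- A's guarded first-initial expression equals B's plain map ('' has no char 0)
    have hfi : ∀ p0 : String,
        (if p0 = "" then (none : Option Char)
         else Option.map PySem.Chars.lowerChar (PySem.List.pyGet? p0.toList 0))
          = Option.map PySem.Chars.lowerChar (PySem.List.pyGet? p0.toList 0) := by
      intro p0
      by_cases hp : p0 = ""
      · subst hp; decide
      · rw [if_neg hp]
    by_cases h : PySem.Str.lower k == pl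
    · simp [pvB_loop, List.find?, h]
    · cases cand with
      | some c => simp [pvB_loop, List.find?, h, ih (some c)]
      | none =>
        by_cases hlen : 2 ≤ (PySem.Str.split₀ k).length
        · by_cases hc1 : PySem.Str.lower ((PySem.List.pyGet? (PySem.Str.split₀ k) (-1)).getD "") = l
          · by_cases hc2 : Option.map PySem.Chars.lowerChar
                (PySem.List.pyGet? (((PySem.Str.split₀ k).head?.getD "")).toList 0) = f
            · have hcond : ((PySem.Str.split₀ k).head?.getD "" = "" → (none : Option Char) = f) := by
                intro hp; rw [← hc2, hp]; decide
              simp [pvB_loop, pvA_lastLoop, List.find?, h, hlen, hc1, hc2, ih (some k)]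
              rw [if_pos hcond]
            · simp [pvB_loop, pvA_lastLoop, List.find?, h, hlen, hc1, hc2, hfi, ih none]
          · simp [pvB_loop, pvA_lastLoop, List.find?, h, hlen, hc1, hfi, ih none]
        · simp [pvB_loop, pvA_lastLoop, List.find?, h, hlen, ih none]

theorem split₀_empty : PySem.Str.split₀ "" = [] := by decide

-- ===== VERDICT (by name: the statement is the Claim_ definition above) =====
theorem match_player_to_pp_spec : Claim_equal_match_player_to_pp := by
  intro pn lines _hdom hpre
  unfold Spec_match_player_to_pp match_player_to_pp match_player_to_pp_alt
  by_cases hk : (PySem.List.dedup (lines.map Prod.fst)).contains pn = true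
  · rw [if_pos hk, if_pos hk]
  · rw [if_neg hk, if_neg hk]
    by_cases hsp : PySem.Str.split₀ pn = []
    · -- Pre_ forces a lowercase match to exist
      have hex : (lines.map Prod.fst).any
          (fun k => PySem.Str.lower k == PySem.Str.lower pn) = true := by
        rcases hpre with h | h
        · exact absurd hsp h
        · exact h
      have hfind : ((PySem.List.dedup (lines.map Prod.fst)).find?
          (fun k => PySem.Str.lower k == PySem.Str.lower pn)).isSome := by
        rw [List.find?_isSome]
        simp only [List.any_eq_true] at hex
        obtain ⟨k, hk1, hk2⟩ := hex
        exact ⟨k, by simpa [PySem.List.mem_dedup] using hk1, hk2⟩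
      obtain ⟨k0, hk0⟩ := Option.isSome_iff_exists.mp hfind
      simp only [hsp, List.isEmpty_nil, if_true]
      rw [pvB_loop_none, hk0]
    · -- nonempty split: pn ≠ "", so A's guarded first initial is B's
      have hpn : pn ≠ "" := by
        intro h; rw [h, split₀_empty] at hsp; exact hsp rfl
      have hne : (PySem.Str.split₀ pn).isEmpty = false := by
        simpa [List.isEmpty_iff] using hsp
      simp only [hne, Bool.false_eq_true, if_false]
      rw [pvB_loop_some, if_pos hpn]
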